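-- pv_equiv track=rewrite | github.com/chingsley/6314_ml_project_sample_collection | EnergySmells_Verified/ExtraUsageOfArrays/gold/count_balanced_pairs/smelly_ count_balanced_pairs.py | count_balanced_pairs
-- ===== SOURCE A (Python) =====
-- def count_balanced_pairs(input_str):
--     """attempts to count the maximum number of adjacent character pairs (e.g., "0" and "1")
--     that can be removed from the input string by repeatedly comparing and removing mismatched pairs.
--     """
--     L = list(input_str)
--     L_ = []
--     a = L.pop(0)
--     cnt = 0
--
--     while True:
--         if len(L) == 0:
--             break
--         else:
--             b = L.pop(0)
--         if a is not b:
--             cnt += 1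
--             if len(L_) != 0:
--                 a = L_.pop()
--             elif len(L) == 0:
--                 break
--             else:
--                 a = L.pop(0)
--         elif a is b:
--             L_.append(a)
--             a = b
--
--     return cnt * 2
-- ===== SOURCE B (Python) =====
-- def count_balanced_pairs(input_str):
--     stack = []
--     cnt = 0
--     for c in input_str:
--         if stack and stack[-1] != c:
--             stack.pop()
--             cnt += 1
--         else:
--             stack.append(c)
--     return cnt * 2
-- ===== Notes on version B (the rewrite author's own statement) =====
-- stated objective: faster
-- what changed: Replaced A's O(n^2) scheme of repeated list.pop(0) with a held head element and a side list by a single left-to-right pass over the string maintaining one explicit stack (push on match-with-top-or-empty, pop-and-count on mismatch).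
import Mathlib
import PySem

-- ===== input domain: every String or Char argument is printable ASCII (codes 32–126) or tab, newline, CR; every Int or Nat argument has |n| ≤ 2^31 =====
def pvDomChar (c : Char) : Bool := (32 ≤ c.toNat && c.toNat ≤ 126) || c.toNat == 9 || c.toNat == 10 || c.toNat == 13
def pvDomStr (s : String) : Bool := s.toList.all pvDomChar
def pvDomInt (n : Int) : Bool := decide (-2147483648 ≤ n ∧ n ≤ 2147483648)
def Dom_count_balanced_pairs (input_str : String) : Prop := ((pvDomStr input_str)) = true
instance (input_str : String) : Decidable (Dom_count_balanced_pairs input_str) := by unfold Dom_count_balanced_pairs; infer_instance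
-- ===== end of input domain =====

-- B replaces A's quadratic pop(0) scheme by a single pass with one explicit stack (objective: faster, asymptotic).
-- Note: Python's `a is not b` on one-character ASCII strings coincides with `!=` (CPython interns them); ported as ≠ on Char.

-- ===== PORT A =====
-- A's while-loop; L_ (the Python side list, append/pop at the end) is represented head-first as a Lean list
-- (cons = append, head = pop), a faithful stack transcription. Each iteration pops b from L, so |L| decreases.
def pvA_loop (L L_ : List Char) (a : Char) (cnt : Int) : Int :=
  match L with
  | [] => cnt
  | b :: L' =>
    if a ≠ b then
      match L_ with
      | a' :: L_' => pvA_loop L' L_' a' (cnt + 1)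
      | [] =>
        match L' with
        | [] => cnt + 1
        | a' :: L'' => pvA_loop L'' [] a' (cnt + 1)
    else
      pvA_loop L' (a :: L_) b cnt
termination_by L.length
decreasing_by all_goals (simp; try omega)

def count_balanced_pairs (input_str : String) : Int :=
  match input_str.toList with
  | [] => 0   -- unreachable under Pre_: Python raises IndexError here (L.pop(0) on [])
  | a :: L => pvA_loop L [] a 0 * 2

-- ===== PORT B =====
def pvB_loop (cs stack : List Char) (cnt : Int) : Int :=
  match cs with
  | [] => cnt
  | c :: rest =>
    match stack with
    | t :: st' => if t ≠ c then pvB_loop rest st' (cnt + 1) else pvB_loop rest (c :: t :: st') cnt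
    | [] => pvB_loop rest [c] cnt

def count_balanced_pairs_alt (input_str : String) : Int :=
  pvB_loop input_str.toList [] 0 * 2

-- ===== PRECONDITION & SPEC =====
-- Pre_ excludes only the empty string, on which A raises IndexError (L.pop(0) on an empty list); B returns 0 there.
def Pre_count_balanced_pairs (input_str : String) : Prop := input_str ≠ ""
instance (input_str : String) : Decidable (Pre_count_balanced_pairs input_str) := by
  unfold Pre_count_balanced_pairs; infer_instance
def pvWitness_count_balanced_pairs : String := "0101"

def Spec_count_balanced_pairs (input_str : String) (out : Int) : Prop := out = count_balanced_pairs_alt input_str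
instance (input_str : String) (out : Int) : Decidable (Spec_count_balanced_pairs input_str out) := by unfold Spec_count_balanced_pairs; infer_instance

-- ===== CLAIM (what is proved, stated in full; the proofs are below) =====
def Claim_equal_count_balanced_pairs : Prop := ∀ (input_str : String), Dom_count_balanced_pairs input_str → Pre_count_balanced_pairs input_str → Spec_count_balanced_pairs input_str (count_balanced_pairs input_str)

-- ===== LEMMAS AND PROOFS =====
-- A's state (L remaining, held element a, side list L_) corresponds to B's state with stack a :: L_.
theorem pvA_eq_pvB (L L_ : List Char) (a : Char) (cnt : Int) :
    pvA_loop L L_ a cnt = pvB_loop L (a :: L_) cnt := by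
  fun_induction pvA_loop L L_ a cnt <;> simp_all [pvB_loop]

-- ===== VERDICT (by name: the statement is the Claim_ definition above) =====
theorem count_balanced_pairs_spec : Claim_equal_count_balanced_pairs := by
  intro s _ hpre
  unfold Spec_count_balanced_pairs count_balanced_pairs count_balanced_pairs_alt
  have hne : s.toList ≠ [] := fun h => hpre (String.toList_eq_nil_iff.mp h)
  match hL : s.toList with
  | [] => exact absurd hL hne
  | a :: L => simp [pvA_eq_pvB, pvB_loop]
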